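-- pv_equiv track=rewrite | github.com/mrsaurabhtanwar/MPECSSCODEPAPER | paper/generate_figures.py | order_counts
-- ===== SOURCE A (Python) =====
-- from collections import Counter
--
-- DISPLAY_ORDER = [
--     "B-stationary",
--     "C-stationary",
--     "S-candidate",
--     "Timeout",
--     "Stationarity unverifiable",
--     "NLP failure",
--     "Comp. infeasible",
--     "OOM",
--     "Crash",
--     "Model load failure",
--     "Other",
-- ]
--
-- def order_counts(counts: Counter) -> dict[str, int]:
--     ordered: dict[str, int] = {}
--     for label in DISPLAY_ORDER:
--         if counts.get(label, 0):
--             ordered[label] = counts[label]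
--
--     leftovers = sorted(label for label in counts if label not in ordered and counts[label] > 0)
--     for label in leftovers:
--         ordered[label] = counts[label]
--
--     return ordered
-- ===== SOURCE B (Python) =====
-- DISPLAY_ORDER = [
--     "B-stationary",
--     "C-stationary",
--     "S-candidate",
--     "Timeout",
--     "Stationarity unverifiable",
--     "NLP failure",
--     "Comp. infeasible",
--     "OOM",
--     "Crash",
--     "Model load failure",
--     "Other",
-- ]
--
-- def order_counts(counts):
--     pos = {label: i for i, label in enumerate(DISPLAY_ORDER)}
--     known = sorted(
--         ((label, c) for label, c in counts.items() if label in pos and c != 0),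
--         key=lambda item: pos[item[0]],
--     )
--     extra = sorted(
--         ((label, c) for label, c in counts.items() if label not in pos and c > 0),
--         key=lambda item: item[0],
--     )
--     return dict(known + extra)
-- ===== Notes on version B (the rewrite author's own statement) =====
-- stated objective: idiomatic
-- what changed: Instead of building the dict incrementally (a loop over DISPLAY_ORDER inserting hits, then a second loop appending sorted leftovers while probing the partially built dict), B precomputes a position index over DISPLAY_ORDER, filters the items once into known (count != 0) and extra (unknown label, count > 0) groups, and produces the result as one dict from two key-sorted lists.
import Mathlib
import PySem

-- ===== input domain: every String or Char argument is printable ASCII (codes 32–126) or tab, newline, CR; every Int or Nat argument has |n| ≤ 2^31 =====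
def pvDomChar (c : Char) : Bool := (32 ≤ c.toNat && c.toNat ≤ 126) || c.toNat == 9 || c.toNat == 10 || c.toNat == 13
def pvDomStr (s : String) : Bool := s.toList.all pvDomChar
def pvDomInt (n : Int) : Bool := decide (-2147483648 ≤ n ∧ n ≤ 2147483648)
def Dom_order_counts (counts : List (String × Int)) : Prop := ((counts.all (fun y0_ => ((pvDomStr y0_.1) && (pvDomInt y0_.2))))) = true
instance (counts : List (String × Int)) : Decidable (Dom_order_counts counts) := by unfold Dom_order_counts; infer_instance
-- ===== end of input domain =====

-- B replaces A's two dict-building loops by a position index over DISPLAY_ORDER, one filter of the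
-- items into "known" (count != 0) and "extra" (unknown label, count > 0) groups and two key-sorts
-- (idiomatic restructuring; same asymptotic cost).


def DISPLAY_ORDER : List String :=
  ["B-stationary", "C-stationary", "S-candidate", "Timeout", "Stationarity unverifiable",
   "NLP failure", "Comp. infeasible", "OOM", "Crash", "Model load failure", "Other"]

-- ===== PORT A =====
-- `counts` is a dict (association list canonicalised like Python's dict(pairs)).
def order_counts (counts : List (String × Int)) : List (String × Int) :=
  let d := PySem.Dict.ofList counts
  let ordered := DISPLAY_ORDER.foldl (fun o label =>
      if d.getD label 0 ≠ 0 then o.insert label (d.getD label 0) else o) PySem.Dict.empty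
  let leftovers := PySem.List.sorted
      (d.keys.filter (fun label => !(ordered.contains label) && decide (d.getD label 0 > 0)))
      (fun l => l)
  let ordered2 := leftovers.foldl (fun o label => o.insert label (d.getD label 0)) ordered
  ordered2.items

-- ===== PORT B =====
def order_counts_alt (counts : List (String × Int)) : List (String × Int) :=
  let d := PySem.Dict.ofList counts
  let pos : PySem.Dict String Int :=
    PySem.Dict.ofList ((PySem.List.enumerate DISPLAY_ORDER).map (fun p => (p.2, p.1)))
  let known := PySem.List.sorted
      (d.items.filter (fun it => pos.contains it.1 && decide (it.2 ≠ 0)))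
      (fun it => pos.getD it.1 0)
  let extra := PySem.List.sorted
      (d.items.filter (fun it => !(pos.contains it.1) && decide (it.2 > 0)))
      (fun it => it.1)
  (PySem.Dict.ofList (known ++ extra)).items

-- ===== PRECONDITION & SPEC =====
def Spec_order_counts (counts : List (String × Int)) (out : List (String × Int)) : Prop := out = order_counts_alt counts
instance (counts : List (String × Int)) (out : List (String × Int)) : Decidable (Spec_order_counts counts out) := by unfold Spec_order_counts; infer_instance

-- ===== CLAIM (what is proved, stated in full; the proofs are below) =====
def Claim_equal_order_counts : Prop := ∀ (counts : List (String × Int)), Dom_order_counts counts → Spec_order_counts counts (order_counts counts)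


-- ===== LEMMAS AND PROOFS =====

-- proof-side names for the intermediate values of the two ports
def pvPos : PySem.Dict String Int :=
  PySem.Dict.ofList ((PySem.List.enumerate DISPLAY_ORDER).map (fun p => (p.2, p.1)))

def pvOrdered (d : PySem.Dict String Int) : PySem.Dict String Int :=
  DISPLAY_ORDER.foldl (fun o label =>
    if d.getD label 0 ≠ 0 then o.insert label (d.getD label 0) else o) PySem.Dict.empty

def pvKnownT (d : PySem.Dict String Int) : List (String × Int) :=
  (DISPLAY_ORDER.filter (fun l => decide (d.getD l 0 ≠ 0))).map (fun l => (l, d.getD l 0))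

def pvLabels (d : PySem.Dict String Int) : List String :=
  d.keys.filter (fun l => !((pvOrdered d).contains l) && decide (d.getD l 0 > 0))

def pvExtraT (d : PySem.Dict String Int) : List (String × Int) :=
  (PySem.List.sorted (pvLabels d) (fun l => l)).map (fun l => (l, d.getD l 0))

theorem display_nodup : DISPLAY_ORDER.Nodup := by decide

theorem pos_keys : pvPos.keys = DISPLAY_ORDER := by decide

theorem pos_contains (l : String) : pvPos.contains l = decide (l ∈ DISPLAY_ORDER) := by
  rw [PySem.Dict.contains_eq_decide_mem_keys, pos_keys]

theorem display_pos_pairwise :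
    DISPLAY_ORDER.Pairwise (fun a b => pvPos.getD a 0 < pvPos.getD b 0) := by decide

-- the first loop of A appends exactly the display-order hits
theorem ordered_items (d : PySem.Dict String Int) :
    (pvOrdered d).items = pvKnownT d := by
  unfold pvOrdered pvKnownT
  rw [show (fun o label => if d.getD label 0 ≠ 0 then o.insert label (d.getD label 0) else o)
        = (fun (o : PySem.Dict String Int) label =>
            if decide (d.getD label 0 ≠ 0) = true then o.insert label (d.getD label 0) else o)
      from by funext o label; simp]
  rw [← List.foldl_filter]
  have h := PySem.Dict.items_foldl_insert_fresh
      (List.filter (fun l => decide (d.getD l 0 ≠ 0)) DISPLAY_ORDER) id (fun l => d.getD l 0)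
      PySem.Dict.empty (by intro a _; simp [PySem.Dict.contains_empty])
      (by simpa using display_nodup.filter _)
  simpa [PySem.Dict.empty] using h

theorem ordered_keys (d : PySem.Dict String Int) :
    (pvOrdered d).keys = DISPLAY_ORDER.filter (fun l => decide (d.getD l 0 ≠ 0)) := by
  show ((pvOrdered d).items).map _ = _
  rw [ordered_items]
  unfold pvKnownT
  rw [List.map_map]
  exact List.map_id _

theorem ordered_contains (d : PySem.Dict String Int) (l : String) :
    ((pvOrdered d).contains l) = (decide (l ∈ DISPLAY_ORDER) && decide (d.getD l 0 ≠ 0)) := by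
  rw [PySem.Dict.contains_eq_decide_mem_keys, ordered_keys]
  by_cases h1 : l ∈ DISPLAY_ORDER <;> by_cases h2 : d.getD l 0 ≠ 0 <;>
    simp [List.mem_filter, h1, h2]

theorem items_nodup (d : PySem.Dict String Int) (hk : d.keys.Nodup) : d.items.Nodup := by
  have h : (d.items.map (fun x => x.1)).Nodup := hk
  exact h.of_map _

theorem pair_inj (d : PySem.Dict String Int) :
    Function.Injective (fun l => (l, d.getD l 0)) := by
  intro a b h
  simpa using congrArg Prod.fst h

theorem mem_items_iff (d : PySem.Dict String Int) (hk : d.keys.Nodup) (l : String) (c : Int)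
    (hc : c ≠ 0) : (l, c) ∈ d.items ↔ d.getD l 0 = c := by
  rw [← PySem.Dict.get?_eq_some_iff_mem_items d l c hk]
  constructor
  · intro h; exact PySem.Dict.getD_of_get?_eq_some d 0 h
  · intro h
    cases hopt : d.get? l with
    | none => exact absurd (h ▸ (PySem.Dict.getD_of_get?_eq_none d 0 hopt).symm) (Ne.symm hc)
    | some v => rw [PySem.Dict.getD_of_get?_eq_some d 0 hopt] at h; exact congrArg some h

theorem mem_keys_of_getD_ne (d : PySem.Dict String Int) (l : String)
    (h : d.getD l 0 ≠ 0) : l ∈ d.keys := by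
  by_contra hmem
  exact h (PySem.Dict.getD_of_get?_eq_none d 0 ((PySem.Dict.get?_eq_none_iff_not_mem_keys d l).mpr hmem))

theorem known_sorted (d : PySem.Dict String Int) (hk : d.keys.Nodup) :
    PySem.List.sorted (d.items.filter (fun it => pvPos.contains it.1 && decide (it.2 ≠ 0)))
      (fun it => pvPos.getD it.1 0) = pvKnownT d := by
  apply PySem.List.sorted_eq_of_perm_of_pairwise_lt
  · unfold pvKnownT
    rw [List.perm_ext_iff_of_nodup
      ((display_nodup.filter _).map (pair_inj d)) ((items_nodup d hk).filter _)]
    rintro ⟨l, c⟩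
    simp only [List.mem_map, List.mem_filter, pos_contains, Prod.mk.injEq,
      Bool.and_eq_true, decide_eq_true_eq]
    constructor
    · rintro ⟨l', ⟨hmem, hne⟩, rfl, rfl⟩
      exact ⟨(mem_items_iff d hk l' _ hne).mpr rfl, hmem, hne⟩
    · rintro ⟨hit, hmem, hne⟩
      have := (mem_items_iff d hk l c hne).mp hit
      exact ⟨l, ⟨hmem, this ▸ hne⟩, rfl, this⟩
  · unfold pvKnownT
    rw [List.pairwise_map]
    exact display_pos_pairwise.filter _

theorem labels_spec (d : PySem.Dict String Int) (l : String) :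
    l ∈ pvLabels d ↔ l ∉ DISPLAY_ORDER ∧ d.getD l 0 > 0 := by
  unfold pvLabels
  simp only [List.mem_filter, ordered_contains, Bool.and_eq_true, Bool.not_eq_true',
    Bool.and_eq_false_iff, decide_eq_true_eq, decide_eq_false_iff_not]
  constructor
  · rintro ⟨-, hcase, hpos⟩
    rcases hcase with h | h
    · exact ⟨h, hpos⟩
    · exact absurd hpos (by omega)
  · rintro ⟨hDO, hpos⟩
    exact ⟨mem_keys_of_getD_ne d l (by omega), Or.inl hDO, hpos⟩

theorem extra_sorted (d : PySem.Dict String Int) (hk : d.keys.Nodup) :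
    PySem.List.sorted (d.items.filter (fun it => !(pvPos.contains it.1) && decide (it.2 > 0)))
      (fun it => it.1) = pvExtraT d := by
  have hlabnd : (pvLabels d).Nodup := hk.filter _
  have hlnd : (PySem.List.sorted (pvLabels d) (fun l => l)).Nodup :=
    ((PySem.List.sorted_perm (pvLabels d) (fun l => l) false).symm).nodup hlabnd
  apply PySem.List.sorted_eq_of_perm_of_pairwise_lt
  · unfold pvExtraT
    rw [List.perm_ext_iff_of_nodup (hlnd.map (pair_inj d)) ((items_nodup d hk).filter _)]
    rintro ⟨l, c⟩
    simp only [List.mem_map, List.mem_filter, PySem.List.mem_sorted, labels_spec,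
      pos_contains, Prod.mk.injEq, Bool.and_eq_true, Bool.not_eq_true', decide_eq_true_eq,
      decide_eq_false_iff_not]
    constructor
    · rintro ⟨l', ⟨hDO, hpos⟩, rfl, rfl⟩
      exact ⟨(mem_items_iff d hk l' _ (by omega)).mpr rfl, hDO, hpos⟩
    · rintro ⟨hit, hDO, hpos⟩
      have := (mem_items_iff d hk l c (by omega)).mp hit
      exact ⟨l, ⟨hDO, this ▸ hpos⟩, rfl, this⟩
  · unfold pvExtraT
    rw [List.pairwise_map]
    exact ((PySem.List.sorted_pairwise (pvLabels d) (fun l => l)).and hlnd).imp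
      (fun h => lt_of_le_of_ne h.1 h.2)

theorem ofList_items (ps : List (String × Int)) (h : (ps.map Prod.fst).Nodup) :
    (PySem.Dict.ofList ps).items = ps := by
  have h2 := PySem.Dict.items_foldl_insert_fresh ps Prod.fst Prod.snd PySem.Dict.empty
      (by intro a _; simp [PySem.Dict.contains_empty]) h
  simpa [PySem.Dict.ofList, PySem.Dict.update, PySem.Dict.empty] using h2

theorem target_keys_nodup (d : PySem.Dict String Int) (hk : d.keys.Nodup) :
    ((pvKnownT d ++ pvExtraT d).map Prod.fst).Nodup := by
  have h1 : (pvKnownT d).map Prod.fst = DISPLAY_ORDER.filter (fun l => decide (d.getD l 0 ≠ 0)) := by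
    unfold pvKnownT; rw [List.map_map]; exact List.map_id _
  have h2 : (pvExtraT d).map Prod.fst = PySem.List.sorted (pvLabels d) (fun l => l) := by
    unfold pvExtraT; rw [List.map_map]; exact List.map_id _
  rw [List.map_append, h1, h2]
  refine List.Nodup.append (display_nodup.filter _)
    (((PySem.List.sorted_perm (pvLabels d) (fun l => l) false).symm).nodup (hk.filter _)) ?_
  rw [List.disjoint_left]
  intro l hmem hmem2
  rw [PySem.List.mem_sorted, labels_spec] at hmem2
  exact hmem2.1 (List.mem_of_mem_filter hmem)

theorem A_core (d : PySem.Dict String Int) (hk : d.keys.Nodup) :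
    (List.foldl (fun o label => o.insert label (d.getD label 0))
        (pvOrdered d) (PySem.List.sorted (pvLabels d) (fun l => l))).items
      = pvKnownT d ++ pvExtraT d := by
  have h := PySem.Dict.items_foldl_insert_fresh
      (PySem.List.sorted (pvLabels d) (fun l => l)) id (fun l => d.getD l 0) (pvOrdered d)
      (by
        intro a ha
        rw [PySem.List.mem_sorted] at ha
        unfold pvLabels at ha
        rw [List.mem_filter] at ha
        have := ha.2
        simp only [Bool.and_eq_true, Bool.not_eq_true'] at this
        exact this.1)
      (by
        simpa using ((PySem.List.sorted_perm (pvLabels d) (fun l => l) false).symm).nodup (hk.filter _))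
  simpa [ordered_items, pvExtraT] using h

theorem A_decomp (counts : List (String × Int)) :
    order_counts counts =
      pvKnownT (PySem.Dict.ofList counts) ++ pvExtraT (PySem.Dict.ofList counts) := by
  unfold order_counts
  exact A_core _ (PySem.Dict.nodup_keys_ofList counts)

theorem B_core (d : PySem.Dict String Int) (hk : d.keys.Nodup) :
    (PySem.Dict.ofList
      (PySem.List.sorted (d.items.filter (fun it => pvPos.contains it.1 && decide (it.2 ≠ 0)))
          (fun it => pvPos.getD it.1 0) ++
       PySem.List.sorted (d.items.filter (fun it => !(pvPos.contains it.1) && decide (it.2 > 0)))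
          (fun it => it.1))).items = pvKnownT d ++ pvExtraT d := by
  rw [known_sorted d hk, extra_sorted d hk, ofList_items _ (target_keys_nodup d hk)]

theorem B_decomp (counts : List (String × Int)) :
    order_counts_alt counts =
      pvKnownT (PySem.Dict.ofList counts) ++ pvExtraT (PySem.Dict.ofList counts) := by
  unfold order_counts_alt
  exact B_core _ (PySem.Dict.nodup_keys_ofList counts)

-- ===== VERDICT (by name: the statement is the Claim_ definition above) =====
theorem order_counts_spec : Claim_equal_order_counts := by
  intro counts _
  show order_counts counts = order_counts_alt counts
  rw [A_decomp, B_decomp]
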